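-- pv_equiv track=rewrite | github.com/EkaterinaGaraeva/python | homework3/task18.py | dictionary_of_difference
-- ===== SOURCE A (Python) =====
-- def dictionary_of_difference(list_of_numbers, number):
--     dict_of_diff = {}
--     for i in list_of_numbers:
--         if i >= number:
--             diff_key = i - number
--             if diff_key not in dict_of_diff.keys():
--                 dict_of_diff[diff_key] = {i}
--             else:
--                 dict_of_diff[diff_key].add(i)
--         else:
--             diff_key = number - i
--             if diff_key not in dict_of_diff.keys():
--                 dict_of_diff[diff_key] = {i}
--             else:
--                 dict_of_diff[diff_key].add(i)
--     return dict_of_diff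
-- ===== SOURCE B (Python) =====
-- def dictionary_of_difference(list_of_numbers, number):
--     # two-pass: collect distinct difference keys in first-occurrence order,
--     # then build each group with a per-key set comprehension over the list
--     keys = []
--     seen = set()
--     for i in list_of_numbers:
--         k = abs(i - number)
--         if k not in seen:
--             seen.add(k)
--             keys.append(k)
--     return {k: {x for x in list_of_numbers if abs(x - number) == k} for k in keys}
-- ===== Notes on version B (the rewrite author's own statement) =====
-- stated objective: alternative
-- what changed: A scatters every element into a dict of sets in one pass with per-branch insert-or-add; B first dedups the difference keys in first-occurrence order, then builds each group with one filter pass per distinct key (a dict comprehension over the key list).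
import Mathlib
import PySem

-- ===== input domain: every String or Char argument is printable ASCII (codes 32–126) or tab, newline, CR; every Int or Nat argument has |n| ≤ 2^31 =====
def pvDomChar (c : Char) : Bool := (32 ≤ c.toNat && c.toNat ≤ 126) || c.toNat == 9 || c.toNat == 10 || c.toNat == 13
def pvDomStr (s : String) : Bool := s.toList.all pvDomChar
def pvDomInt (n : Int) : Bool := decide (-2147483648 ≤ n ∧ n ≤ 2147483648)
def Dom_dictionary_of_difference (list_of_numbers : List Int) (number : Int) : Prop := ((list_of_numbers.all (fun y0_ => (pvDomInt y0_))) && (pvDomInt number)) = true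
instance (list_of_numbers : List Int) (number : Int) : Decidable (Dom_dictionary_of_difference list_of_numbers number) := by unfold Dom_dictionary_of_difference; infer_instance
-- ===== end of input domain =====

-- B replaces A's single-pass dict accumulation by a two-pass scheme (dedup the difference
-- keys in first-occurrence order, then build each group by one filter pass per key);
-- objective: alternative decomposition, same results.


-- ===== PORT A =====
-- single pass: scatter each i into a dict keyed by the (branch-computed) difference
def dictionary_of_difference (list_of_numbers : List Int) (number : Int) : List (Int × List Int) :=
  (list_of_numbers.foldl
    (fun (d : PySem.Dict Int (PySem.Set Int)) (i : Int) =>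
      if i ≥ number then
        let diff_key := i - number
        if d.contains diff_key = false then
          d.insert diff_key (PySem.Set.add PySem.Set.empty i)
        else
          d.modify diff_key PySem.Set.empty (fun s => PySem.Set.add s i)
      else
        let diff_key := number - i
        if d.contains diff_key = false then
          d.insert diff_key (PySem.Set.add PySem.Set.empty i)
        else
          d.modify diff_key PySem.Set.empty (fun s => PySem.Set.add s i))
    PySem.Dict.empty).items

-- ===== PORT B =====
-- two passes: distinct keys in first-occurrence order, then one filter pass per key
def dictionary_of_difference_alt (list_of_numbers : List Int) (number : Int) : List (Int × List Int) :=
  let p := list_of_numbers.foldl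
    (fun (p : List Int × PySem.Set Int) (i : Int) =>
      let k := |i - number|
      if PySem.Set.contains p.2 k then p else (p.1 ++ [k], PySem.Set.add p.2 k))
    ([], PySem.Set.empty)
  p.1.map (fun k => (k, PySem.Set.ofList (list_of_numbers.filter (fun x => |x - number| == k))))

-- ===== PRECONDITION & SPEC =====
def Spec_dictionary_of_difference (list_of_numbers : List Int) (number : Int) (out : List (Int × List Int)) : Prop := out = dictionary_of_difference_alt list_of_numbers number
instance (list_of_numbers : List Int) (number : Int) (out : List (Int × List Int)) : Decidable (Spec_dictionary_of_difference list_of_numbers number out) := by unfold Spec_dictionary_of_difference; infer_instance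

-- ===== CLAIM (what is proved, stated in full; the proofs are below) =====
def Claim_equal_dictionary_of_difference : Prop := ∀ (list_of_numbers : List Int) (number : Int), Dom_dictionary_of_difference list_of_numbers number → Spec_dictionary_of_difference list_of_numbers number (dictionary_of_difference list_of_numbers number)

-- ===== LEMMAS AND PROOFS =====

-- A's branch-computed key is |i - number|, and both of A's inner branches are one modify.
lemma stepA_eq (number : Int) :
    (fun (d : PySem.Dict Int (PySem.Set Int)) (i : Int) =>
      if i ≥ number then
        let diff_key := i - number
        if d.contains diff_key = false then
          d.insert diff_key (PySem.Set.add PySem.Set.empty i)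
        else
          d.modify diff_key PySem.Set.empty (fun s => PySem.Set.add s i)
      else
        let diff_key := number - i
        if d.contains diff_key = false then
          d.insert diff_key (PySem.Set.add PySem.Set.empty i)
        else
          d.modify diff_key PySem.Set.empty (fun s => PySem.Set.add s i)) =
    fun d i => d.modify (|i - number|) PySem.Set.empty (fun s => PySem.Set.add s i) := by
  funext d i
  have hmod : ∀ (k : Int), d.contains k = false →
      d.insert k (PySem.Set.add PySem.Set.empty i)
        = d.modify k PySem.Set.empty (fun s => PySem.Set.add s i) := by
    intro k h
    simp [PySem.Dict.modify, PySem.Dict.getD_of_not_contains _ _ h, PySem.Set.add,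
      PySem.Set.contains, PySem.Set.empty]
  by_cases hge : i ≥ number
  · have hk : |i - number| = i - number := abs_of_nonneg (by omega)
    simp only [hge, if_pos, hk]
    by_cases hc : d.contains (i - number) = false
    · simp only [hc, if_pos]; rw [hmod _ hc]
    · simp [hc]
  · have hk : |i - number| = number - i := by rw [abs_of_nonpos (by omega)]; ring
    simp only [if_neg hge, hk]
    by_cases hc : d.contains (number - i) = false
    · simp only [hc, if_pos]; rw [hmod _ hc]
    · simp [hc]

-- value accumulated at key k by A's (uniform) loop
lemma getD_loopA (number : Int) (l : List Int) (d : PySem.Dict Int (PySem.Set Int)) (k : Int) :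
    (l.foldl (fun d i => d.modify (|i - number|) PySem.Set.empty (fun s => PySem.Set.add s i)) d).getD k PySem.Set.empty
      = PySem.Set.update (d.getD k PySem.Set.empty) (l.filter (fun i => |i - number| == k)) := by
  induction l generalizing d with
  | nil => simp [PySem.Set.update]
  | cons i t ih =>
    simp only [List.foldl_cons, List.filter_cons, ih]
    by_cases hk : |i - number| = k
    · simp [hk, PySem.Dict.getD_modify_self, PySem.Set.update]
    · simp [PySem.Dict.getD_modify, show k ≠ |i - number| from fun h => hk h.symm, hk]

-- B's first pass keeps its two components equal and accumulates Set.add over the keys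
lemma loopB_eq (number : Int) (l : List Int) (s : PySem.Set Int) :
    l.foldl
      (fun (p : List Int × PySem.Set Int) (i : Int) =>
        let k := |i - number|
        if PySem.Set.contains p.2 k then p else (p.1 ++ [k], PySem.Set.add p.2 k))
      (s, s)
      = (PySem.Set.update s (l.map (fun i => |i - number|)),
         PySem.Set.update s (l.map (fun i => |i - number|))) := by
  induction l generalizing s with
  | nil => simp [PySem.Set.update]
  | cons i t ih =>
    simp only [List.foldl_cons, List.map_cons]
    have hstep : (if PySem.Set.contains s (|i - number|) = true then ((s : List Int), s)
        else (s ++ [|i - number|], PySem.Set.add s (|i - number|)))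
        = ((PySem.Set.add s (|i - number|) : PySem.Set Int), PySem.Set.add s (|i - number|)) := by
      by_cases h : |i - number| ∈ s <;>
        simp [PySem.Set.add, PySem.Set.contains, h]
    have hupd : PySem.Set.update s (|i - number| :: t.map (fun i => |i - number|))
        = PySem.Set.update (PySem.Set.add s (|i - number|)) (t.map (fun i => |i - number|)) := by
      simp [PySem.Set.update]
    rw [hstep, hupd]
    exact ih _

-- ===== VERDICT (by name: the statement is the Claim_ definition above) =====
theorem dictionary_of_difference_spec : Claim_equal_dictionary_of_difference := by
  intro xs number _
  unfold Spec_dictionary_of_difference dictionary_of_difference dictionary_of_difference_alt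
  rw [stepA_eq]
  have hinit : (([], PySem.Set.empty) : List Int × PySem.Set Int)
      = ((PySem.Set.empty : PySem.Set Int), (PySem.Set.empty : PySem.Set Int)) := rfl
  simp only [hinit, loopB_eq]
  have hnd : (xs.foldl (fun d i =>
      d.modify (|i - number|) PySem.Set.empty (fun s => PySem.Set.add s i)) PySem.Dict.empty).keys.Nodup :=
    PySem.Dict.nodup_keys_foldl_modify_key xs (fun i => |i - number|) PySem.Set.empty _
      PySem.Dict.empty PySem.Dict.nodup_keys_empty
  rw [PySem.Dict.items_eq_map_keys _ hnd PySem.Set.empty,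
    PySem.Dict.keys_foldl_modify_key]
  have hempty : PySem.Dict.keys (PySem.Dict.empty : PySem.Dict Int (PySem.Set Int))
      = (PySem.Set.empty : PySem.Set Int) := rfl
  rw [hempty]
  refine List.map_congr_left ?_
  intro k _
  rw [getD_loopA]
  have : PySem.Dict.getD (PySem.Dict.empty : PySem.Dict Int (PySem.Set Int)) k PySem.Set.empty
      = PySem.Set.empty := rfl
  rw [this]
  rfl
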